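-- pv_equiv track=rewrite | github.com/UnknownCoder08181994/EdPlat | quality_control/qa_tests/test_07_deep_analysis.py | porter_stem
-- ===== SOURCE A (Python) =====
-- def porter_stem(word: str) -> str:
--     """Minimal Porter stemmer — strips common English suffixes.
--     Not a full implementation but catches 80% of inflections."""
--     w = word.lower()
--     # Step 1: plurals and -ed/-ing
--     if w.endswith("sses"):
--         w = w[:-2]
--     elif w.endswith("ies"):
--         w = w[:-2]
--     elif w.endswith("ss"):
--         pass
--     elif w.endswith("s") and len(w) > 3:
--         w = w[:-1]
--
--     if w.endswith("eed"):
--         pass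
--     elif w.endswith("ed") and len(w) > 4:
--         w = w[:-2]
--     elif w.endswith("ing") and len(w) > 5:
--         w = w[:-3]
--
--     # Step 2: common derivational suffixes
--     for suffix in ("ational", "ation", "ator"):
--         if w.endswith(suffix) and len(w) - len(suffix) > 2:
--             w = w[:-len(suffix)]
--             break
--     for suffix in ("fulness", "ously", "ively", "ment", "ness", "ible", "able", "ment"):
--         if w.endswith(suffix) and len(w) - len(suffix) > 2:
--             w = w[:-len(suffix)]
--             break
--
--     return w
-- ===== SOURCE B (Python) =====
-- # Longest-applicable-suffix algorithm: each stage scans ALL of its rules, collects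
-- # those whose suffix matches and length bound holds, and strips the LONGEST one
-- # (strip 0 encodes the ss/eed blockers) -- no ordered first-match scan.
-- _STAGES = [
--     {"sses": (2, 0), "ies": (2, 0), "ss": (0, 0), "s": (1, 4)},
--     {"eed": (0, 0), "ed": (2, 5), "ing": (3, 6)},
--     {"ational": (7, 10), "ation": (5, 8), "ator": (4, 7)},
--     {"fulness": (7, 10), "ously": (5, 8), "ively": (5, 8),
--      "ment": (4, 7), "ness": (4, 7), "ible": (4, 7), "able": (4, 7)},
-- ]
--
--
-- def porter_stem(word: str) -> str:
--     w = word.lower()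
--     for rules in _STAGES:
--         matches = [s for s in rules if w.endswith(s) and len(w) >= rules[s][1]]
--         if matches:
--             best = max(matches, key=len)
--             w = w[:len(w) - rules[best][0]]
--     return w
-- ===== Notes on version B (the rewrite author's own statement) =====
-- stated objective: alternative
-- what changed: Replaces A's ordered first-match elif chains and break loops by a longest-applicable-suffix rule: each stage scans all of its rules, collects every suffix that matches with its length bound satisfied, and strips the longest one (strip 0 encoding the ss/eed blockers).
import Mathlib
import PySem

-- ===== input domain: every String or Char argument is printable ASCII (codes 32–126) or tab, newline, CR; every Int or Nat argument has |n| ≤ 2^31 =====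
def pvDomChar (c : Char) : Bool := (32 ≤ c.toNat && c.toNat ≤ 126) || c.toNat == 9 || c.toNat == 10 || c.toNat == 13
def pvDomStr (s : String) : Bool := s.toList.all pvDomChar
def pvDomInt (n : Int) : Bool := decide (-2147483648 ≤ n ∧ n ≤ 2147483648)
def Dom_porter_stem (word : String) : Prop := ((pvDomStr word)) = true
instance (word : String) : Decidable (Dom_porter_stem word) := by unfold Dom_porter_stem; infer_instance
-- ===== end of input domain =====

-- B replaces A's ordered first-match elif chains / break loops by a longest-applicable-suffix
-- rule per stage (collect all matching rules, strip the longest; strip 0 = blocker); same cost.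

-- ===== PORT A =====
-- A's 'for suffix in (…): if w.endswith(suffix) and len(w) - len(suffix) > 2: w = w[:-len(suffix)]; break'
def pvStep2Loop (w : List Char) : List (List Char) → List Char
  | [] => w
  | suf :: rest =>
    if PySem.Chars.endswith w suf && decide ((2 : Int) < (w.length : Int) - (suf.length : Int)) then
      PySem.List.slice w none (some (-(suf.length : Int)))
    else pvStep2Loop w rest

def porter_stem (word : String) : String :=
  let w0 := PySem.Chars.lower word.toList
  let w1 :=
    if PySem.Chars.endswith w0 "sses".toList then PySem.List.slice w0 none (some (-2))
    else if PySem.Chars.endswith w0 "ies".toList then PySem.List.slice w0 none (some (-2))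
    else if PySem.Chars.endswith w0 "ss".toList then w0
    else if PySem.Chars.endswith w0 "s".toList && decide (3 < w0.length) then
      PySem.List.slice w0 none (some (-1))
    else w0
  let w2 :=
    if PySem.Chars.endswith w1 "eed".toList then w1
    else if PySem.Chars.endswith w1 "ed".toList && decide (4 < w1.length) then
      PySem.List.slice w1 none (some (-2))
    else if PySem.Chars.endswith w1 "ing".toList && decide (5 < w1.length) then
      PySem.List.slice w1 none (some (-3))
    else w1
  let w3 := pvStep2Loop w2 ["ational".toList, "ation".toList, "ator".toList]
  let w4 := pvStep2Loop w3 ["fulness".toList, "ously".toList, "ively".toList, "ment".toList,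
                            "ness".toList, "ible".toList, "able".toList, "ment".toList]
  String.ofList w4

-- ===== PORT B =====
-- B's stage: 'matches = [s for s in rules if w.endswith(s) and len(w) >= rules[s][1]];
-- if matches: w = w[:len(w) - rules[max(matches, key=len)][0]]' — Python's max keeps the
-- first element of maximal key under a left scan (strictly-greater replaces).
def pvStage (w : List Char) (rules : List (List Char × Nat × Nat)) : List Char :=
  match rules.filter (fun r => PySem.Chars.endswith w r.1 && decide (r.2.2 ≤ w.length)) with
  | [] => w
  | m :: ms =>
    PySem.List.slice w none
      (some ((w.length : Int) -
        (((ms.foldl (fun acc x => if acc.1.length < x.1.length then x else acc) m).2.1 : Nat) : Int)))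

def pvStages : List (List (List Char × Nat × Nat)) :=
  [ [("sses".toList, 2, 0), ("ies".toList, 2, 0), ("ss".toList, 0, 0), ("s".toList, 1, 4)],
    [("eed".toList, 0, 0), ("ed".toList, 2, 5), ("ing".toList, 3, 6)],
    [("ational".toList, 7, 10), ("ation".toList, 5, 8), ("ator".toList, 4, 7)],
    [("fulness".toList, 7, 10), ("ously".toList, 5, 8), ("ively".toList, 5, 8),
     ("ment".toList, 4, 7), ("ness".toList, 4, 7), ("ible".toList, 4, 7), ("able".toList, 4, 7)] ]

def porter_stem_alt (word : String) : String :=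
  String.ofList (pvStages.foldl pvStage (PySem.Chars.lower word.toList))

-- ===== PRECONDITION & SPEC =====
def Spec_porter_stem (word : String) (out : String) : Prop := out = porter_stem_alt word
instance (word : String) (out : String) : Decidable (Spec_porter_stem word out) := by unfold Spec_porter_stem; infer_instance

-- ===== CLAIM (what is proved, stated in full; the proofs are below) =====
def Claim_equal_porter_stem : Prop := ∀ (word : String), Dom_porter_stem word → Spec_porter_stem word (porter_stem word)

-- ===== LEMMAS AND PROOFS =====
theorem pv_ends_len {w suf : List Char} (h : PySem.Chars.endswith w suf = true) :
    suf.length ≤ w.length :=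
  ((PySem.Chars.endswith_iff w suf).mp h).length_le

-- a suffix of a suffix of w is a suffix of w
theorem pv_mono {w s t : List Char} (hws : PySem.Chars.endswith w s = true)
    (hst : PySem.Chars.endswith s t = true) : PySem.Chars.endswith w t = true := by
  rw [PySem.Chars.endswith_iff] at *
  exact hst.trans hws

-- two suffixes of the same word are comparable, so incomparable literal suffixes exclude each other
theorem pv_excl {w s1 s2 : List Char} (h1 : PySem.Chars.endswith w s1 = true)
    (h2 : PySem.Chars.endswith w s2 = true)
    (h12 : PySem.Chars.endswith s2 s1 = false) (h21 : PySem.Chars.endswith s1 s2 = false) : False := by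
  rw [PySem.Chars.endswith_iff] at h1 h2
  rcases List.suffix_or_suffix_of_suffix h1 h2 with h | h
  · rw [(PySem.Chars.endswith_iff s2 s1).mpr h] at h12; cases h12
  · rw [(PySem.Chars.endswith_iff s1 s2).mpr h] at h21; cases h21

theorem pv_false_of_mono {w s t : List Char} (hn : PySem.Chars.endswith w t = false)
    (hst : PySem.Chars.endswith s t = true) : PySem.Chars.endswith w s = false := by
  cases h : PySem.Chars.endswith w s
  · rfl
  · rw [pv_mono h hst] at hn; cases hn

theorem pv_false_of_excl {w s1 s2 : List Char} (h2 : PySem.Chars.endswith w s2 = true)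
    (h12 : PySem.Chars.endswith s2 s1 = false) (h21 : PySem.Chars.endswith s1 s2 = false) :
    PySem.Chars.endswith w s1 = false := by
  cases h : PySem.Chars.endswith w s1
  · rfl
  · exact (pv_excl h h2 h12 h21).elim

theorem pv_strip (w : List Char) (k : Nat) (h0 : 0 < k) (h : k ≤ w.length) :
    PySem.List.slice w none (some ((w.length : Int) - (k : Int))) =
    PySem.List.slice w none (some (-(k : Int))) := by
  have hcast : ((w.length : Int) - (k : Int)) = (((w.length - k : Nat) : Int)) := by omega
  rw [hcast, PySem.List.slice_to_natCast, PySem.List.slice_to_neg_natCast w k h0]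

theorem pv_stripI (w : List Char) (c : Int) (h0 : 0 < c) (hc : c ≤ (w.length : Int)) :
    PySem.List.slice w none (some ((w.length : Int) - c)) = PySem.List.slice w none (some (-c)) := by
  obtain ⟨k, rfl⟩ : ∃ k : Nat, c = (k : Int) := ⟨c.toNat, by omega⟩
  exact pv_strip w k (by omega) (by omega)

-- A's step-2 loop condition, decided from endswith and a length bound
theorem pv_cond2_true {w suf : List Char} {k : Nat} (hk : suf.length = k)
    (hl : k + 3 ≤ w.length) :
    (true && decide ((2 : Int) < (w.length : Int) - (suf.length : Int))) = true := by
  simp [hk]; omega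

theorem pv_cond2_false {w suf : List Char} {k : Nat} (hk : suf.length = k)
    (hl : ¬ (k + 3 ≤ w.length)) :
    (true && decide ((2 : Int) < (w.length : Int) - (suf.length : Int))) = false := by
  simp [hk]; omega

theorem pv_g1 (w : List Char) :
    pvStage w [("sses".toList, 2, 0), ("ies".toList, 2, 0), ("ss".toList, 0, 0), ("s".toList, 1, 4)] =
    (if PySem.Chars.endswith w "sses".toList then PySem.List.slice w none (some (-2))
     else if PySem.Chars.endswith w "ies".toList then PySem.List.slice w none (some (-2))
     else if PySem.Chars.endswith w "ss".toList then w
     else if PySem.Chars.endswith w "s".toList && decide (3 < w.length) then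
       PySem.List.slice w none (some (-1))
     else w) := by
  by_cases hsb : PySem.Chars.endswith w "s".toList = true
  · by_cases hsses : PySem.Chars.endswith w "sses".toList = true
    · have hies := pv_false_of_excl (s1 := "ies".toList) hsses (by decide) (by decide)
      have hss := pv_false_of_excl (s1 := "ss".toList) hsses (by decide) (by decide)
      have hl : 4 ≤ w.length := pv_ends_len hsses
      simp only [pvStage, List.filter, hsb, hsses, hies, hss, decide_eq_true hl,
        Nat.zero_le, decide_true, Bool.and_self, Bool.and_true, Bool.false_and, List.foldl]
      rw [if_neg (by decide)]
      norm_num [hsses]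
      rw [pv_stripI w 2 (by omega) (by omega)]
    · have hsses' : PySem.Chars.endswith w "sses".toList = false := by simpa using hsses
      by_cases hies : PySem.Chars.endswith w "ies".toList = true
      · have hss := pv_false_of_excl (s1 := "ss".toList) hies (by decide) (by decide)
        have hl : 3 ≤ w.length := pv_ends_len hies
        by_cases h4 : 4 ≤ w.length
        · simp only [pvStage, List.filter, hsb, hsses', hies, hss, decide_eq_true h4,
            Nat.zero_le, decide_true, Bool.and_self, Bool.and_true, Bool.false_and, List.foldl]
          rw [if_neg (by decide)]
          norm_num [hsses', hies]
          rw [pv_stripI w 2 (by omega) (by omega)]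
        · simp only [pvStage, List.filter, hsb, hsses', hies, hss, decide_eq_false h4,
            Nat.zero_le, decide_true, Bool.and_self, Bool.and_true, Bool.false_and,
            Bool.and_false, List.foldl]
          norm_num [hsses', hies]
          rw [pv_stripI w 2 (by omega) (by omega)]
      · have hies' : PySem.Chars.endswith w "ies".toList = false := by simpa using hies
        by_cases hss : PySem.Chars.endswith w "ss".toList = true
        · by_cases h4 : 4 ≤ w.length
          · simp only [pvStage, List.filter, hsb, hsses', hies', hss, decide_eq_true h4,
              Nat.zero_le, decide_true, Bool.and_self, Bool.and_true, Bool.false_and, List.foldl]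
            rw [if_neg (by decide)]
            norm_num [hsses', hies', hss]
          · simp only [pvStage, List.filter, hsb, hsses', hies', hss, decide_eq_false h4,
              Nat.zero_le, decide_true, Bool.and_self, Bool.and_true, Bool.false_and,
              Bool.and_false, List.foldl]
            norm_num [hsses', hies', hss]
        · have hss' : PySem.Chars.endswith w "ss".toList = false := by simpa using hss
          by_cases h4 : 4 ≤ w.length
          · simp only [pvStage, List.filter, hsb, hsses', hies', hss', decide_eq_true h4,
              Nat.zero_le, decide_true, Bool.and_self, Bool.and_true, Bool.false_and, List.foldl]
            norm_num [hsses', hies', hss', hsb, show 3 < w.length by omega]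
            rw [pv_stripI w 1 (by omega) (by omega)]
          · simp only [pvStage, List.filter, hsb, hsses', hies', hss', decide_eq_false h4,
              Nat.zero_le, decide_true, Bool.and_self, Bool.and_true, Bool.false_and,
              Bool.and_false, List.foldl]
            norm_num [hsses', hies', hss', hsb, show ¬ (3 < w.length) by omega]
  · have hs' : PySem.Chars.endswith w "s".toList = false := by simpa using hsb
    have hsses := pv_false_of_mono (s := "sses".toList) hs' (by decide)
    have hies := pv_false_of_mono (s := "ies".toList) hs' (by decide)
    have hss := pv_false_of_mono (s := "ss".toList) hs' (by decide)
    simp only [pvStage, List.filter, hsses, hies, hss, hs', Bool.false_and]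
    rw [if_neg (by simp [hsses]),
        if_neg (by simp [hies]),
        if_neg (by simp [hss]),
        if_neg (by simp [hs'])]

theorem pv_g2 (w : List Char) :
    pvStage w [("eed".toList, 0, 0), ("ed".toList, 2, 5), ("ing".toList, 3, 6)] =
    (if PySem.Chars.endswith w "eed".toList then w
     else if PySem.Chars.endswith w "ed".toList && decide (4 < w.length) then
       PySem.List.slice w none (some (-2))
     else if PySem.Chars.endswith w "ing".toList && decide (5 < w.length) then
       PySem.List.slice w none (some (-3))
     else w) := by
  by_cases heed : PySem.Chars.endswith w "eed".toList = true
  · have hed : PySem.Chars.endswith w "ed".toList = true := pv_mono heed (by decide)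
    have hing := pv_false_of_excl (s1 := "ing".toList) heed (by decide) (by decide)
    by_cases h5 : 5 ≤ w.length
    · simp only [pvStage, List.filter, heed, hed, hing, decide_eq_true h5,
        Nat.zero_le, decide_true, Bool.and_self, Bool.and_true, Bool.false_and, List.foldl]
      rw [if_neg (by decide)]
      norm_num [heed]
    · simp only [pvStage, List.filter, heed, hed, hing, decide_eq_false h5,
        Nat.zero_le, decide_true, Bool.and_self, Bool.and_true, Bool.false_and,
        Bool.and_false, List.foldl]
      norm_num [heed]
  · have heed' : PySem.Chars.endswith w "eed".toList = false := by simpa using heed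
    by_cases hed : PySem.Chars.endswith w "ed".toList = true
    · have hing := pv_false_of_excl (s1 := "ing".toList) hed (by decide) (by decide)
      by_cases h5 : 5 ≤ w.length
      · simp only [pvStage, List.filter, heed', hed, hing, decide_eq_true h5,
          Nat.zero_le, decide_true, Bool.and_self, Bool.and_true, Bool.false_and, List.foldl]
        norm_num [heed', hed, show 4 < w.length by omega]
        rw [pv_stripI w 2 (by omega) (by omega)]
      · simp only [pvStage, List.filter, heed', hed, hing, decide_eq_false h5,
          Nat.zero_le, decide_true, Bool.and_self, Bool.and_true, Bool.false_and,
          Bool.and_false, List.foldl]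
        norm_num [heed', hed, show ¬ (4 < w.length) by omega]
    · have hed' : PySem.Chars.endswith w "ed".toList = false := by simpa using hed
      by_cases hing : PySem.Chars.endswith w "ing".toList = true
      · by_cases h6 : 6 ≤ w.length
        · simp only [pvStage, List.filter, heed', hed', hing, decide_eq_true h6,
            Nat.zero_le, decide_true, Bool.and_self, Bool.and_true, Bool.false_and, List.foldl]
          norm_num [heed', hed', hing, show 5 < w.length by omega]
          rw [pv_stripI w 3 (by omega) (by omega)]
        · simp only [pvStage, List.filter, heed', hed', hing, decide_eq_false h6,
            Nat.zero_le, decide_true, Bool.and_self, Bool.and_true, Bool.false_and,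
            Bool.and_false, List.foldl]
          norm_num [heed', hed', hing, show ¬ (5 < w.length) by omega]
      · have hing' : PySem.Chars.endswith w "ing".toList = false := by simpa using hing
        simp only [pvStage, List.filter, heed', hed', hing', Bool.false_and]
        rw [if_neg (by simp [heed']),
            if_neg (by simp [hed']),
            if_neg (by simp [hing'])]

theorem pv_g3 (w : List Char) :
    pvStage w [("ational".toList, 7, 10), ("ation".toList, 5, 8), ("ator".toList, 4, 7)] =
    pvStep2Loop w ["ational".toList, "ation".toList, "ator".toList] := by
  by_cases h1 : PySem.Chars.endswith w "ational".toList = true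
  · have h2 := pv_false_of_excl (s1 := "ation".toList) h1 (by decide) (by decide)
    have h3 := pv_false_of_excl (s1 := "ator".toList) h1 (by decide) (by decide)
    by_cases hl : 10 ≤ w.length
    · simp only [pvStage, List.filter, h1, h2, h3, decide_eq_true hl, Bool.and_true,
        Bool.false_and, List.foldl, pvStep2Loop]
      rw [if_pos (pv_cond2_true (w := w) (suf := "ational".toList) (k := 7) rfl (by omega))]
      norm_num
      rw [pv_stripI w 7 (by omega) (by omega : (7:Int) ≤ (w.length : Int)),
          show ("ational".length) = 7 from by decide]
      norm_num
    · simp only [pvStage, List.filter, h1, h2, h3, decide_eq_false hl, Bool.and_true,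
        Bool.false_and, Bool.and_false, List.foldl, pvStep2Loop]
      rw [if_neg (by rw [pv_cond2_false (w := w) (suf := "ational".toList) (k := 7) rfl
            (by omega)]; exact Bool.false_ne_true),
          if_neg (by simp), if_neg (by simp)]
  · have h1' : PySem.Chars.endswith w "ational".toList = false := by simpa using h1
    by_cases h2 : PySem.Chars.endswith w "ation".toList = true
    · have h3 := pv_false_of_excl (s1 := "ator".toList) h2 (by decide) (by decide)
      by_cases hl : 8 ≤ w.length
      · simp only [pvStage, List.filter, h1', h2, h3, decide_eq_true hl, Bool.and_true,
          Bool.false_and, List.foldl, pvStep2Loop]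
        rw [if_neg (by simp),
            if_pos (pv_cond2_true (w := w) (suf := "ation".toList) (k := 5) rfl (by omega))]
        norm_num
        rw [pv_stripI w 5 (by omega) (by omega : (5:Int) ≤ (w.length : Int)),
            show ("ation".length) = 5 from by decide]
        norm_num
      · simp only [pvStage, List.filter, h1', h2, h3, decide_eq_false hl, Bool.and_true,
          Bool.false_and, Bool.and_false, List.foldl, pvStep2Loop]
        rw [if_neg (by simp),
            if_neg (by rw [pv_cond2_false (w := w) (suf := "ation".toList) (k := 5) rfl
              (by omega)]; exact Bool.false_ne_true),
            if_neg (by simp)]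
    · have h2' : PySem.Chars.endswith w "ation".toList = false := by simpa using h2
      by_cases h3 : PySem.Chars.endswith w "ator".toList = true
      · by_cases hl : 7 ≤ w.length
        · simp only [pvStage, List.filter, h1', h2', h3, decide_eq_true hl, Bool.and_true,
            Bool.false_and, List.foldl, pvStep2Loop]
          rw [if_neg (by simp), if_neg (by simp),
              if_pos (pv_cond2_true (w := w) (suf := "ator".toList) (k := 4) rfl (by omega))]
          norm_num
          rw [pv_stripI w 4 (by omega) (by omega : (4:Int) ≤ (w.length : Int)),
              show ("ator".length) = 4 from by decide]
          norm_num
        · simp only [pvStage, List.filter, h1', h2', h3, decide_eq_false hl, Bool.and_true,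
            Bool.false_and, Bool.and_false, List.foldl, pvStep2Loop]
          rw [if_neg (by simp), if_neg (by simp),
              if_neg (by rw [pv_cond2_false (w := w) (suf := "ator".toList) (k := 4) rfl
                (by omega)]; exact Bool.false_ne_true)]
      · have h3' : PySem.Chars.endswith w "ator".toList = false := by simpa using h3
        simp only [pvStage, List.filter, pvStep2Loop, h1', h2', h3', Bool.false_and]
        rw [if_neg (by simp), if_neg (by simp), if_neg (by simp)]

theorem pv_g4 (w : List Char) :
    pvStage w [("fulness".toList, 7, 10), ("ously".toList, 5, 8), ("ively".toList, 5, 8),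
      ("ment".toList, 4, 7), ("ness".toList, 4, 7), ("ible".toList, 4, 7), ("able".toList, 4, 7)] =
    pvStep2Loop w ["fulness".toList, "ously".toList, "ively".toList, "ment".toList,
                   "ness".toList, "ible".toList, "able".toList, "ment".toList] := by
  by_cases hfulness : PySem.Chars.endswith w "fulness".toList = true
  · have hness : PySem.Chars.endswith w "ness".toList = true := pv_mono hfulness (by decide)
    have hously := pv_false_of_excl (s1 := "ously".toList) hfulness (by decide) (by decide)
    have hively := pv_false_of_excl (s1 := "ively".toList) hfulness (by decide) (by decide)
    have hment := pv_false_of_excl (s1 := "ment".toList) hfulness (by decide) (by decide)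
    have hible := pv_false_of_excl (s1 := "ible".toList) hfulness (by decide) (by decide)
    have hable := pv_false_of_excl (s1 := "able".toList) hfulness (by decide) (by decide)
    have hl7 : 7 ≤ w.length := pv_ends_len hfulness
    by_cases hl : 10 ≤ w.length
    · simp only [pvStage, List.filter, hfulness, hness, hously, hively, hment, hible, hable,
        decide_eq_true hl, decide_eq_true (show 7 ≤ w.length by omega), Bool.and_true,
        Bool.false_and, List.foldl, pvStep2Loop]
      rw [if_neg (by decide),
          if_pos (pv_cond2_true (w := w) (suf := "fulness".toList) (k := 7) rfl (by omega))]
      norm_num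
      rw [pv_stripI w 7 (by omega) (by omega : (7:Int) ≤ (w.length : Int)),
          show ("fulness".length) = 7 from by decide]
      norm_num
    · simp only [pvStage, List.filter, hfulness, hness, hously, hively, hment, hible, hable,
        decide_eq_false hl, decide_eq_true (show 7 ≤ w.length by omega), Bool.and_true,
        Bool.and_false, Bool.false_and, List.foldl, pvStep2Loop]
      rw [if_neg (by rw [pv_cond2_false (w := w) (suf := "fulness".toList) (k := 7) rfl (by omega)]; exact Bool.false_ne_true),
          if_neg (by simp), if_neg (by simp), if_neg (by simp),
          if_pos (pv_cond2_true (w := w) (suf := "ness".toList) (k := 4) rfl (by omega))]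
      norm_num
      rw [pv_stripI w 4 (by omega) (by omega : (4:Int) ≤ (w.length : Int)),
          show ("ness".length) = 4 from by decide]
      norm_num
  · have hfulness' : PySem.Chars.endswith w "fulness".toList = false := by simpa using hfulness
    by_cases hously : PySem.Chars.endswith w "ously".toList = true
    · have hively := pv_false_of_excl (s1 := "ively".toList) hously (by decide) (by decide)
      have hment := pv_false_of_excl (s1 := "ment".toList) hously (by decide) (by decide)
      have hness := pv_false_of_excl (s1 := "ness".toList) hously (by decide) (by decide)
      have hible := pv_false_of_excl (s1 := "ible".toList) hously (by decide) (by decide)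
      have hable := pv_false_of_excl (s1 := "able".toList) hously (by decide) (by decide)
      by_cases hl : 8 ≤ w.length
      · simp only [pvStage, List.filter, hfulness', hously, hively, hment, hness, hible, hable,
          decide_eq_true hl, Bool.and_true, Bool.false_and, List.foldl, pvStep2Loop]
        rw [if_neg (by simp),
            if_pos (pv_cond2_true (w := w) (suf := "ously".toList) (k := 5) rfl (by omega))]
        norm_num
        rw [pv_stripI w 5 (by omega) (by omega : (5:Int) ≤ (w.length : Int)),
            show ("ously".length) = 5 from by decide]
        norm_num
      · simp only [pvStage, List.filter, hfulness', hously, hively, hment, hness, hible, hable,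
          decide_eq_false hl, Bool.and_true, Bool.and_false, Bool.false_and, List.foldl, pvStep2Loop]
        rw [if_neg (by simp),
            if_neg (by rw [pv_cond2_false (w := w) (suf := "ously".toList) (k := 5) rfl (by omega)]; exact Bool.false_ne_true),
            if_neg (by simp),
            if_neg (by simp),
            if_neg (by simp),
            if_neg (by simp),
            if_neg (by simp),
            if_neg (by simp)]
    · have hously' : PySem.Chars.endswith w "ously".toList = false := by simpa using hously
      by_cases hively : PySem.Chars.endswith w "ively".toList = true
      · have hment := pv_false_of_excl (s1 := "ment".toList) hively (by decide) (by decide)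
        have hness := pv_false_of_excl (s1 := "ness".toList) hively (by decide) (by decide)
        have hible := pv_false_of_excl (s1 := "ible".toList) hively (by decide) (by decide)
        have hable := pv_false_of_excl (s1 := "able".toList) hively (by decide) (by decide)
        by_cases hl : 8 ≤ w.length
        · simp only [pvStage, List.filter, hfulness', hously', hively, hment, hness, hible, hable,
            decide_eq_true hl, Bool.and_true, Bool.false_and, List.foldl, pvStep2Loop]
          rw [if_neg (by simp),
              if_neg (by simp),
              if_pos (pv_cond2_true (w := w) (suf := "ively".toList) (k := 5) rfl (by omega))]
          norm_num
          rw [pv_stripI w 5 (by omega) (by omega : (5:Int) ≤ (w.length : Int)),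
              show ("ively".length) = 5 from by decide]
          norm_num
        · simp only [pvStage, List.filter, hfulness', hously', hively, hment, hness, hible, hable,
            decide_eq_false hl, Bool.and_true, Bool.and_false, Bool.false_and, List.foldl, pvStep2Loop]
          rw [if_neg (by simp),
              if_neg (by simp),
              if_neg (by rw [pv_cond2_false (w := w) (suf := "ively".toList) (k := 5) rfl (by omega)]; exact Bool.false_ne_true),
              if_neg (by simp),
              if_neg (by simp),
              if_neg (by simp),
              if_neg (by simp),
              if_neg (by simp)]
      · have hively' : PySem.Chars.endswith w "ively".toList = false := by simpa using hively
        by_cases hment : PySem.Chars.endswith w "ment".toList = true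
        · have hness := pv_false_of_excl (s1 := "ness".toList) hment (by decide) (by decide)
          have hible := pv_false_of_excl (s1 := "ible".toList) hment (by decide) (by decide)
          have hable := pv_false_of_excl (s1 := "able".toList) hment (by decide) (by decide)
          by_cases hl : 7 ≤ w.length
          · simp only [pvStage, List.filter, hfulness', hously', hively', hment, hness, hible, hable,
              decide_eq_true hl, Bool.and_true, Bool.false_and, List.foldl, pvStep2Loop]
            rw [if_neg (by simp),
                if_neg (by simp),
                if_neg (by simp),
                if_pos (pv_cond2_true (w := w) (suf := "ment".toList) (k := 4) rfl (by omega))]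
            norm_num
            rw [pv_stripI w 4 (by omega) (by omega : (4:Int) ≤ (w.length : Int)),
                show ("ment".length) = 4 from by decide]
            norm_num
          · simp only [pvStage, List.filter, hfulness', hously', hively', hment, hness, hible, hable,
              decide_eq_false hl, Bool.and_true, Bool.and_false, Bool.false_and, List.foldl, pvStep2Loop]
            rw [if_neg (by simp),
                if_neg (by simp),
                if_neg (by simp),
                if_neg (by rw [pv_cond2_false (w := w) (suf := "ment".toList) (k := 4) rfl (by omega)]; exact Bool.false_ne_true),
                if_neg (by simp),
                if_neg (by simp),
                if_neg (by simp),
                if_neg (by rw [pv_cond2_false (w := w) (suf := "ment".toList) (k := 4) rfl (by omega)]; exact Bool.false_ne_true)]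
        · have hment' : PySem.Chars.endswith w "ment".toList = false := by simpa using hment
          by_cases hness : PySem.Chars.endswith w "ness".toList = true
          · have hible := pv_false_of_excl (s1 := "ible".toList) hness (by decide) (by decide)
            have hable := pv_false_of_excl (s1 := "able".toList) hness (by decide) (by decide)
            by_cases hl : 7 ≤ w.length
            · simp only [pvStage, List.filter, hfulness', hously', hively', hment', hness, hible, hable,
                decide_eq_true hl, Bool.and_true, Bool.false_and, List.foldl, pvStep2Loop]
              rw [if_neg (by simp),
                  if_neg (by simp),
                  if_neg (by simp),
                  if_neg (by simp),
                  if_pos (pv_cond2_true (w := w) (suf := "ness".toList) (k := 4) rfl (by omega))]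
              norm_num
              rw [pv_stripI w 4 (by omega) (by omega : (4:Int) ≤ (w.length : Int)),
                  show ("ness".length) = 4 from by decide]
              norm_num
            · simp only [pvStage, List.filter, hfulness', hously', hively', hment', hness, hible, hable,
                decide_eq_false hl, Bool.and_true, Bool.and_false, Bool.false_and, List.foldl, pvStep2Loop]
              rw [if_neg (by simp),
                  if_neg (by simp),
                  if_neg (by simp),
                  if_neg (by simp),
                  if_neg (by rw [pv_cond2_false (w := w) (suf := "ness".toList) (k := 4) rfl (by omega)]; exact Bool.false_ne_true),
                  if_neg (by simp),
                  if_neg (by simp),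
                  if_neg (by simp)]
          · have hness' : PySem.Chars.endswith w "ness".toList = false := by simpa using hness
            by_cases hible : PySem.Chars.endswith w "ible".toList = true
            · have hable := pv_false_of_excl (s1 := "able".toList) hible (by decide) (by decide)
              by_cases hl : 7 ≤ w.length
              · simp only [pvStage, List.filter, hfulness', hously', hively', hment', hness', hible, hable,
                  decide_eq_true hl, Bool.and_true, Bool.false_and, List.foldl, pvStep2Loop]
                rw [if_neg (by simp),
                    if_neg (by simp),
                    if_neg (by simp),
                    if_neg (by simp),
                    if_neg (by simp),
                    if_pos (pv_cond2_true (w := w) (suf := "ible".toList) (k := 4) rfl (by omega))]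
                norm_num
                rw [pv_stripI w 4 (by omega) (by omega : (4:Int) ≤ (w.length : Int)),
                    show ("ible".length) = 4 from by decide]
                norm_num
              · simp only [pvStage, List.filter, hfulness', hously', hively', hment', hness', hible, hable,
                  decide_eq_false hl, Bool.and_true, Bool.and_false, Bool.false_and, List.foldl, pvStep2Loop]
                rw [if_neg (by simp),
                    if_neg (by simp),
                    if_neg (by simp),
                    if_neg (by simp),
                    if_neg (by simp),
                    if_neg (by rw [pv_cond2_false (w := w) (suf := "ible".toList) (k := 4) rfl (by omega)]; exact Bool.false_ne_true),
                    if_neg (by simp),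
                    if_neg (by simp)]
            · have hible' : PySem.Chars.endswith w "ible".toList = false := by simpa using hible
              by_cases hable : PySem.Chars.endswith w "able".toList = true
              · by_cases hl : 7 ≤ w.length
                · simp only [pvStage, List.filter, hfulness', hously', hively', hment', hness', hible', hable,
                    decide_eq_true hl, Bool.and_true, Bool.false_and, List.foldl, pvStep2Loop]
                  rw [if_neg (by simp),
                      if_neg (by simp),
                      if_neg (by simp),
                      if_neg (by simp),
                      if_neg (by simp),
                      if_neg (by simp),
                      if_pos (pv_cond2_true (w := w) (suf := "able".toList) (k := 4) rfl (by omega))]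
                  norm_num
                  rw [pv_stripI w 4 (by omega) (by omega : (4:Int) ≤ (w.length : Int)),
                      show ("able".length) = 4 from by decide]
                  norm_num
                · simp only [pvStage, List.filter, hfulness', hously', hively', hment', hness', hible', hable,
                    decide_eq_false hl, Bool.and_true, Bool.and_false, Bool.false_and, List.foldl, pvStep2Loop]
                  rw [if_neg (by simp),
                      if_neg (by simp),
                      if_neg (by simp),
                      if_neg (by simp),
                      if_neg (by simp),
                      if_neg (by simp),
                      if_neg (by rw [pv_cond2_false (w := w) (suf := "able".toList) (k := 4) rfl (by omega)]; exact Bool.false_ne_true),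
                      if_neg (by simp)]
              · have hable' : PySem.Chars.endswith w "able".toList = false := by simpa using hable
                simp only [pvStage, List.filter, hfulness', hously', hively', hment', hness', hible', hable', Bool.false_and, pvStep2Loop]
                rw [if_neg (by simp), if_neg (by simp), if_neg (by simp), if_neg (by simp), if_neg (by simp), if_neg (by simp), if_neg (by simp), if_neg (by simp)]

-- ===== VERDICT (by name: the statement is the Claim_ definition above) =====
theorem porter_stem_spec : Claim_equal_porter_stem := by
  intro word _
  unfold Spec_porter_stem porter_stem porter_stem_alt pvStages
  simp only [List.foldl_cons, List.foldl_nil, pv_g1, pv_g2, pv_g3, pv_g4]
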